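-- pv_equiv track=rewrite | github.com/lixinchn/LeetCode | src/0044_WildcardMatching.py | pre_treat_p
-- ===== SOURCE A (Python) =====
-- def pre_treat_p(p):
--     i = 0
--     new_p = ''
--     while i < len(p):
--         if p[i] == '*':
--             new_p += p[i]
--             while i < len(p) and p[i] == '*':
--                 i += 1
--             continue
--         new_p += p[i]
--         i += 1
--     return new_p
-- ===== SOURCE B (Python) =====
-- def pre_treat_p(p):
--     out = []
--     prev = ''
--     for c in p:
--         if c != '*' or prev != '*':
--             out.append(c)
--         prev = c
--     return ''.join(out)
-- ===== Notes on version B (the rewrite author's own statement) =====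
-- stated objective: simpler
-- what changed: Replaces A's index walk with an inner star-skipping while loop and quadratic string concatenation by a single flat pass that appends each character to a list unless it is a star immediately preceded by a kept star, tracking only the previous character.
import Mathlib
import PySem

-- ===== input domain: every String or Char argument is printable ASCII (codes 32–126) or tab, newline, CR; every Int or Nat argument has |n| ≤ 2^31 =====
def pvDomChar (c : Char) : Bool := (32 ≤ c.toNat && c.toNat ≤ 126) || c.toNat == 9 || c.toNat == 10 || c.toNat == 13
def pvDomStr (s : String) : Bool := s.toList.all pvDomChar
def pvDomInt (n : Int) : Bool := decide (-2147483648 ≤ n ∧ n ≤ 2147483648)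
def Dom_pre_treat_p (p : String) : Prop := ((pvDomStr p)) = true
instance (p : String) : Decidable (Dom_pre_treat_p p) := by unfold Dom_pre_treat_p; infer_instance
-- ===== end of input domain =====

-- B collapses runs of '*' in one flat pass tracking the previous character; simpler than A's nested index walk.

-- ===== PORT A =====
-- A's outer while loop over the index i, recursing on the not-yet-consumed suffix of p;
-- the inner `while i < len(p) and p[i] == '*'` skip loop is dropWhile (· = '*').
def pre_treat_p_loop (cs : List Char) (acc : List Char) : List Char :=
  match cs with
  | [] => acc
  | c :: rest =>
    if c = '*' then
      pre_treat_p_loop (rest.dropWhile (· = '*')) (acc ++ [c])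
    else
      pre_treat_p_loop rest (acc ++ [c])
termination_by cs.length
decreasing_by
  · exact Nat.lt_succ_of_le (rest.length_dropWhile_le _)
  · simp

def pre_treat_p (p : String) : String :=
  String.ofList (pre_treat_p_loop p.toList [])

-- ===== PORT B =====
-- fold step: keep c unless it is a '*' right after a kept '*'; prev = none models Python's initial prev = ''
def pre_treat_p_altStep (st : List Char × Option Char) (c : Char) : List Char × Option Char :=
  if c ≠ '*' ∨ st.2 ≠ some '*' then (st.1 ++ [c], some c) else (st.1, some c)

def pre_treat_p_alt (p : String) : String :=
  String.ofList (p.toList.foldl pre_treat_p_altStep ([], none)).1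

-- ===== PRECONDITION & SPEC =====
def Spec_pre_treat_p (p : String) (out : String) : Prop := out = pre_treat_p_alt p
instance (p : String) (out : String) : Decidable (Spec_pre_treat_p p out) := by unfold Spec_pre_treat_p; infer_instance

-- ===== CLAIM (what is proved, stated in full; the proofs are below) =====
def Claim_equal_pre_treat_p : Prop := ∀ (p : String), Dom_pre_treat_p p → Spec_pre_treat_p p (pre_treat_p p)

-- ===== LEMMAS AND PROOFS =====

theorem dropWhile_head_false {α : Type} {p : α → Bool} {l tl : List α} {c : α}
    (h : l.dropWhile p = c :: tl) : p c = false := by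
  induction l with
  | nil => simp [List.dropWhile] at h
  | cons a l ih =>
    by_cases hp : p a
    · rw [List.dropWhile_cons_of_pos hp] at h; exact ih h
    · rw [List.dropWhile_cons_of_neg hp] at h
      cases h
      simpa using hp

-- While prev = '*', B drops every leading '*' without changing the state: folding from ('*') over cs
-- equals folding over cs with its leading stars removed.
theorem foldl_step_stars (cs : List Char) (acc : List Char) :
    cs.foldl pre_treat_p_altStep (acc, some '*')
      = (cs.dropWhile (· = '*')).foldl pre_treat_p_altStep (acc, some '*') := by
  induction cs with
  | nil => rfl
  | cons c rest ih =>
    by_cases hc : c = '*'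
    · subst hc
      simpa [pre_treat_p_altStep, List.dropWhile] using ih
    · simp [List.dropWhile, hc]

theorem loop_eq_foldl (cs : List Char) (acc : List Char) (prev : Option Char)
    (h : prev = some '*' → cs.head? ≠ some '*') :
    pre_treat_p_loop cs acc = (cs.foldl pre_treat_p_altStep (acc, prev)).1 := by
  revert prev h
  induction cs, acc using pre_treat_p_loop.induct with
  | case1 acc => intro prev h; simp [pre_treat_p_loop]
  | case2 acc rest ih =>
    intro prev h
    have hprev : prev ≠ some '*' := by
      intro hp
      exact (h hp) (by simp)
    rw [pre_treat_p_loop]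
    rw [List.foldl_cons]
    have hstep : pre_treat_p_altStep (acc, prev) '*' = (acc ++ ['*'], some '*') := by
      simp [pre_treat_p_altStep, hprev]
    rw [hstep, foldl_step_stars]
    exact ih (some '*') (fun _ => by
      intro hhd
      rcases List.head?_eq_some_iff.mp hhd with ⟨tl, htl⟩
      have := dropWhile_head_false htl
      simp at this)
  | case3 acc c rest hc ih =>
    intro prev h
    rw [pre_treat_p_loop]
    simp only [if_neg hc]
    rw [List.foldl_cons]
    have hstep : pre_treat_p_altStep (acc, prev) c = (acc ++ [c], some c) := by
      simp [pre_treat_p_altStep, hc]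
    rw [hstep]
    exact ih (some c) (fun hp => by
      injection hp with hp; exact absurd hp hc)

-- ===== VERDICT (by name: the statement is the Claim_ definition above) =====
theorem pre_treat_p_spec : Claim_equal_pre_treat_p := by
  intro p _
  unfold Spec_pre_treat_p pre_treat_p pre_treat_p_alt
  rw [loop_eq_foldl p.toList [] none (by simp)]
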